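-- pv_equiv track=rewrite | github.com/dsda56180/ai-deep-research-agent | scripts/knowledge_evolution_v2.py | extract_knowledge_gaps
-- ===== SOURCE A (Python) =====
-- from typing import Dict, List, Optional
--
-- def extract_knowledge_gaps(paper: Dict) -> List[Dict]:
--     """从论文提取知识缺口"""
--     gaps = []
--
--     # 检查局限性关键词
--     limitation_keywords = [
--         "future work", "limitation", "remains to be",
--         "not addressed", "left for future", "open problem"
--     ]
--
--     abstract = paper.get("abstract", "").lower()
--
--     for kw in limitation_keywords:
--         if kw in abstract:
--             sentences = abstract.split(".")
--             for s in sentences: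
--                 if kw in s:
--                     gaps.append({
--                         "title": f"{paper.get('title', '')[:30]}...",
--                         "description": s.strip(),
--                         "source": paper.get("arxiv_id", paper.get("url", "")),
--                         "priority": "high" if "critical" in s or "important" in s else "medium",
--                         "suggestion": "后续研究重点关注"
--                     })
--                     break
--
--     return gaps
-- ===== SOURCE B (Python) =====
-- def _make_gap(paper, s):
--     return {
--         "title": f"{paper.get('title', '')[:30]}...",
--         "description": s.strip(),
--         "source": paper.get("arxiv_id", paper.get("url", "")),
--         "priority": "high" if "critical" in s or "important" in s else "medium",
--         "suggestion": "后续研究重点关注",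
--     }
--
--
-- def extract_knowledge_gaps(paper):
--     """从论文提取知识缺口 — one functional pass over the sentences maintaining, in a list
--     parallel to the keyword list, each keyword's first matching sentence (or None);
--     a final comprehension emits the gaps in keyword order."""
--     limitation_keywords = [
--         "future work", "limitation", "remains to be",
--         "not addressed", "left for future", "open problem"
--     ]
--     abstract = paper.get("abstract", "").lower()
--     sentences = abstract.split(".")
--     firsts = [None] * len(limitation_keywords)
--     for s in sentences:
--         firsts = [f if f is not None else (s if kw in s else None)
--                   for f, kw in zip(firsts, limitation_keywords)]
--     return [_make_gap(paper, f)
--             for kw, f in zip(limitation_keywords, firsts)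
--             if kw in abstract and f is not None]
-- ===== Notes on version B (the rewrite author's own statement) =====
-- stated objective: alternative
-- what changed: A re-splits the abstract and rescans the whole sentence list separately for each keyword with a break; B splits once and makes a single functional pass over the sentences, carrying a list of per-keyword first-match slots (parallel to the keyword list, updated with zip), then emits the gaps with one comprehension in keyword order.
import Mathlib
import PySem

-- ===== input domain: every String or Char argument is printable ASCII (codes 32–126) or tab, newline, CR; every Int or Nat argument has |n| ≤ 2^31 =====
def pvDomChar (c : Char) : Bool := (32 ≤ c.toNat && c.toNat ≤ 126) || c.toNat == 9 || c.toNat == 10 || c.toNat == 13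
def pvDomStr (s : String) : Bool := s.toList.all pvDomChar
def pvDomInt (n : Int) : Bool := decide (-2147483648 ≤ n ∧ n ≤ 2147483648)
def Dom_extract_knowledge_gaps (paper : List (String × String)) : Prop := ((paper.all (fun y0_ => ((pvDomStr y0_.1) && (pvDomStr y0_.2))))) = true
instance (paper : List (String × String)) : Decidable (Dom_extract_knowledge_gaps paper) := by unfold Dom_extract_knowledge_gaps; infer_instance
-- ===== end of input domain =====

-- B replaces A's per-keyword re-split-and-rescan (with break) by one split plus one
-- functional pass over the sentences carrying a list of per-keyword first-match slots,
-- then a single comprehension that emits in keyword order (objective: alternative, not faster).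


-- ===== PORT A =====
-- the literal keyword list of A
def pvKeywordsA : List String :=
  ["future work", "limitation", "remains to be",
   "not addressed", "left for future", "open problem"]

-- A's inner 'for s in sentences: if kw in s: gaps.append({...}); break'
def pvInnerA (paper : List (String × String)) (kw : String)
    (gaps : List (List (String × String))) :
    List String → List (List (String × String))
  | [] => gaps
  | s :: rest =>
      if PySem.Str.isIn kw s then
        gaps ++ [[("title", PySem.Str.slice (PySem.Dict.getD (PySem.Dict.mk paper) "title" "") none (some 30) ++ "..."),
                  ("description", PySem.Str.strip s),
                  ("source", PySem.Dict.getD (PySem.Dict.mk paper) "arxiv_id" (PySem.Dict.getD (PySem.Dict.mk paper) "url" "")),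
                  ("priority", if PySem.Str.isIn "critical" s || PySem.Str.isIn "important" s then "high" else "medium"),
                  ("suggestion", "后续研究重点关注")]]
      else pvInnerA paper kw gaps rest

def extract_knowledge_gaps (paper : List (String × String)) : List (List (String × String)) :=
  let abstract := PySem.Str.lower (PySem.Dict.getD (PySem.Dict.mk paper) "abstract" "")
  pvKeywordsA.foldl
    (fun gaps kw =>
      if PySem.Str.isIn kw abstract then
        pvInnerA paper kw gaps ((PySem.Str.split? abstract ".").getD [])
      else gaps)
    []

-- ===== PORT B =====
def pvKeywordsB : List String :=
  ["future work", "limitation", "remains to be",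
   "not addressed", "left for future", "open problem"]

-- B's _make_gap helper
def pvMakeGap (paper : List (String × String)) (s : String) : List (String × String) :=
  [("title", PySem.Str.slice (PySem.Dict.getD (PySem.Dict.mk paper) "title" "") none (some 30) ++ "..."),
   ("description", PySem.Str.strip s),
   ("source", PySem.Dict.getD (PySem.Dict.mk paper) "arxiv_id" (PySem.Dict.getD (PySem.Dict.mk paper) "url" "")),
   ("priority", if PySem.Str.isIn "critical" s || PySem.Str.isIn "important" s then "high" else "medium"),
   ("suggestion", "后续研究重点关注")]

-- B's slot update: 'f if f is not None else (s if kw in s else None)'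
def pvUpd (s : String) (f : Option String) (kw : String) : Option String :=
  match f with
  | some t => some t
  | none => if PySem.Str.isIn kw s then some s else none

-- B's per-sentence comprehension '[f if f is not None else (s if kw in s else None) for f, kw in zip(firsts, limitation_keywords)]'
def pvUpdRow (s : String) : List (Option String) → List String → List (Option String)
  | f :: fs, kw :: kws => pvUpd s f kw :: pvUpdRow s fs kws
  | _, _ => []

-- B's 'for s in sentences: firsts = [...]' loop
def pvPassB : List String → List (Option String) → List (Option String)
  | [], fs => fs
  | s :: rest, fs => pvPassB rest (pvUpdRow s fs pvKeywordsB)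

-- B's emission comprehension over 'zip(limitation_keywords, firsts)'
def pvEmitB (paper : List (String × String)) (abstract : String) :
    List String → List (Option String) → List (List (String × String))
  | kw :: kws, f :: fs =>
      if PySem.Str.isIn kw abstract then
        match f with
        | some s => pvMakeGap paper s :: pvEmitB paper abstract kws fs
        | none => pvEmitB paper abstract kws fs
      else pvEmitB paper abstract kws fs
  | _, _ => []

def extract_knowledge_gaps_alt (paper : List (String × String)) : List (List (String × String)) :=
  let abstract := PySem.Str.lower (PySem.Dict.getD (PySem.Dict.mk paper) "abstract" "")
  let sentences := (PySem.Str.split? abstract ".").getD []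
  pvEmitB paper abstract pvKeywordsB
    (pvPassB sentences (pvKeywordsB.map (fun _ => none)))

-- ===== PRECONDITION & SPEC =====
def Spec_extract_knowledge_gaps (paper : List (String × String)) (out : List (List (String × String))) : Prop := out = extract_knowledge_gaps_alt paper
instance (paper : List (String × String)) (out : List (List (String × String))) : Decidable (Spec_extract_knowledge_gaps paper out) := by unfold Spec_extract_knowledge_gaps; infer_instance

-- ===== CLAIM (what is proved, stated in full; the proofs are below) =====
def Claim_equal_extract_knowledge_gaps : Prop := ∀ (paper : List (String × String)), Dom_extract_knowledge_gaps paper → Spec_extract_knowledge_gaps paper (extract_knowledge_gaps paper)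

-- ===== LEMMAS AND PROOFS =====

-- A's inner loop is 'append the gap of the first matching sentence, if any'
theorem pvInnerA_eq_find (paper : List (String × String)) (kw : String)
    (gaps : List (List (String × String))) (l : List String) :
    pvInnerA paper kw gaps l =
      gaps ++ ((l.find? (fun s => PySem.Str.isIn kw s)).elim [] (fun s => [pvMakeGap paper s])) := by
  induction l with
  | nil => simp [pvInnerA]
  | cons s rest ih =>
      simp only [pvInnerA]
      cases h : PySem.Str.isIn kw s
      · rw [if_neg Bool.false_ne_true,
            List.find?_cons_of_neg (by show ¬PySem.Str.isIn kw s = true; rw [h]; exact Bool.false_ne_true),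
            ih]
      · rw [if_pos rfl, List.find?_cons_of_pos (show PySem.Str.isIn kw s = true from h)]
        rfl

-- one slot evolves independently: the sentence fold over 'kw :: kws' splits head/tail
theorem pvPass_cons (l : List String) (kw : String) (kws : List String)
    (f : Option String) (fs : List (Option String)) :
    l.foldl (fun fs s => List.zipWith (pvUpd s) fs (kw :: kws)) (f :: fs) =
      (l.foldl (fun f s => pvUpd s f kw) f) ::
        l.foldl (fun fs s => List.zipWith (pvUpd s) fs kws) fs := by
  induction l generalizing f fs with
  | nil => rfl
  | cons s rest ih => simp only [List.foldl_cons, List.zipWith_cons_cons, ih]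

-- the scalar slot fold computes the first matching sentence
theorem pvSlot_eq_find (kw : String) (l : List String) (f : Option String) :
    l.foldl (fun f s => pvUpd s f kw) f =
      match f with
      | some t => some t
      | none => l.find? (fun s => PySem.Str.isIn kw s) := by
  induction l generalizing f with
  | nil => cases f <;> rfl
  | cons s rest ih =>
      simp only [List.foldl_cons]
      cases f with
      | some t => rw [show pvUpd s (some t) kw = some t from rfl, ih]
      | none =>
          show rest.foldl _ (pvUpd s none kw) = _
          cases h : PySem.Str.isIn kw s
          · rw [show pvUpd s none kw = none by simp only [pvUpd, h]; rfl, ih,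
                List.find?_cons_of_neg (by show ¬PySem.Str.isIn kw s = true; rw [h]; exact Bool.false_ne_true)]
          · rw [show pvUpd s none kw = some s by simp only [pvUpd, h]; rfl, ih,
                List.find?_cons_of_pos (show PySem.Str.isIn kw s = true from h)]

-- the whole slot list after the pass is the per-keyword first matches, in order
theorem pvPass_eq_map (l : List String) (kws : List String) :
    l.foldl (fun fs s => List.zipWith (pvUpd s) fs kws) (kws.map (fun _ => none)) =
      kws.map (fun kw => l.find? (fun s => PySem.Str.isIn kw s)) := by
  induction kws with
  | nil =>
      simp only [List.map_nil]
      induction l with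
      | nil => rfl
      | cons s rest ih => simpa using ih
  | cons kw kws ih =>
      simp only [List.map_cons, pvPass_cons, ih, pvSlot_eq_find]

-- B's row update is zipWith of the slot update
theorem pvUpdRow_eq_zipWith (s : String) :
    ∀ (fs : List (Option String)) (kws : List String),
      pvUpdRow s fs kws = List.zipWith (pvUpd s) fs kws
  | [], [] => rfl
  | [], _ :: _ => rfl
  | _ :: _, [] => rfl
  | f :: fs, kw :: kws => by
      simp only [pvUpdRow, List.zipWith_cons_cons, pvUpdRow_eq_zipWith s fs kws]

-- B's sentence loop is the fold of the row update
theorem pvPassB_eq_foldl :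
    ∀ (l : List String) (fs : List (Option String)),
      pvPassB l fs = l.foldl (fun fs s => List.zipWith (pvUpd s) fs pvKeywordsB) fs
  | [], fs => rfl
  | s :: rest, fs => by
      simp only [pvPassB, List.foldl_cons, pvUpdRow_eq_zipWith, pvPassB_eq_foldl rest]

-- B's emission over a keyword list zipped with its own image
theorem pvEmitB_eq_filterMap (paper : List (String × String)) (abstract : String)
    (g : String → Option String) :
    ∀ (kws : List String),
      pvEmitB paper abstract kws (kws.map g) =
        (kws.map (fun kw => (kw, g kw))).filterMap
          (fun p => if PySem.Str.isIn p.1 abstract then p.2.map (pvMakeGap paper) else none)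
  | [] => rfl
  | kw :: kws => by
      simp only [List.map_cons, pvEmitB, List.filterMap_cons, pvEmitB_eq_filterMap paper abstract g kws]
      cases h : PySem.Str.isIn kw abstract
      · rw [if_neg Bool.false_ne_true, if_neg Bool.false_ne_true]
      · rw [if_pos rfl, if_pos rfl]
        cases g kw <;> rfl

-- A's accumulator fold equals B's filterMap emission, per keyword
theorem pvEmit_eq (paper : List (String × String)) (abstract : String) (l : List String) :
    ∀ (kws : List String) (gaps : List (List (String × String))),
    kws.foldl
      (fun gaps kw => if PySem.Str.isIn kw abstract then pvInnerA paper kw gaps l else gaps)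
      gaps =
      gaps ++ (kws.map (fun kw => (kw, l.find? (fun s => PySem.Str.isIn kw s)))).filterMap
        (fun p => if PySem.Str.isIn p.1 abstract then p.2.map (pvMakeGap paper) else none) := by
  intro kws
  induction kws with
  | nil => simp
  | cons kw kws ih =>
      intro gaps
      simp only [List.foldl_cons, List.map_cons, List.filterMap_cons]
      cases h : PySem.Str.isIn kw abstract
      · rw [if_neg Bool.false_ne_true, if_neg Bool.false_ne_true, ih]
      · rw [if_pos rfl, if_pos rfl, pvInnerA_eq_find, ih, List.append_assoc]
        cases l.find? (fun s => PySem.Str.isIn kw s) <;> rfl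

-- ===== VERDICT (by name: the statement is the Claim_ definition above) =====
theorem extract_knowledge_gaps_spec : Claim_equal_extract_knowledge_gaps := by
  intro paper _
  show extract_knowledge_gaps paper = extract_knowledge_gaps_alt paper
  simp only [extract_knowledge_gaps, extract_knowledge_gaps_alt]
  rw [show pvKeywordsA = pvKeywordsB from rfl, pvPassB_eq_foldl, pvPass_eq_map,
      pvEmitB_eq_filterMap, pvEmit_eq]
  rfl
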